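-- pv_equiv track=rewrite | github.com/RaidriarB/SummifyAI | web/app.py | is_valid_steps
-- ===== SOURCE A (Python) =====
-- def is_valid_steps(steps):
--     if not steps:
--         return False
--     if any(s not in "1234" for s in steps):
--         return False
--     ordered = []
--     for s in steps:
--         if s not in ordered:
--             ordered.append(s)
--     return ordered == sorted(ordered)
-- ===== SOURCE B (Python) =====
-- def is_valid_steps(steps):
--     if not steps:
--         return False
--     seen = set()
--     mx = ''
--     for s in steps:
--         if s not in "1234":
--             return False
--         if s not in seen:
--             if s < mx:
--                 return False
--             seen.add(s)
--             mx = s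
--     return True
-- ===== Notes on version B (the rewrite author's own statement) =====
-- stated objective: simpler
-- what changed: Replaces A's build-distinct-list-then-compare-with-sorted() by a single early-exiting pass that keeps a seen-set and a running maximum and checks each new digit is not below the maximum, eliminating the sort entirely.
import Mathlib
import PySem

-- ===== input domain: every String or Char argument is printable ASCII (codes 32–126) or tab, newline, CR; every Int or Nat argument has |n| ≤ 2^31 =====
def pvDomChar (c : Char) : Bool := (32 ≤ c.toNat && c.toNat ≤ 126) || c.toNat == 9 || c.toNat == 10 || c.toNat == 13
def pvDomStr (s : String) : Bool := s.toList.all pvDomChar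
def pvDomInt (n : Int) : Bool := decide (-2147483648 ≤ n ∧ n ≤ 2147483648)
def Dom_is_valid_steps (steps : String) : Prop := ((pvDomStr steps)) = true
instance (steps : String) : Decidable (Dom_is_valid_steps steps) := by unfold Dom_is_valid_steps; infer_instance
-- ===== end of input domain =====

-- B replaces A's dedup-then-compare-with-sorted() check by one early-exiting pass with a seen-set and a running maximum (simpler; no sort).


-- ===== PORT A =====
def is_valid_steps (steps : String) : Bool :=
  if steps.toList.isEmpty then false
  else if steps.toList.any (fun s => !(("1234" : String).toList.contains s)) then false
  else
    let ordered := steps.toList.foldl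
      (fun acc s => if acc.contains s then acc else acc ++ [s]) ([] : List Char)
    decide (ordered = PySem.List.sorted ordered (fun x => x) false)

-- ===== PORT B =====
-- the for-loop of Source B: state = (seen : set, mx : Option Char); none models the initial mx = '',
-- for which Python's s < '' is always false, so the none branch has no s < mx test
def altLoop : List Char → PySem.Set Char → Option Char → Bool
  | [], _, _ => true
  | s :: rest, seen, mx =>
    if !(("1234" : String).toList.contains s) then false
    else if PySem.Set.contains seen s then altLoop rest seen mx
    else
      match mx with
      | some c => if s < c then false else altLoop rest (PySem.Set.add seen s) (some s)
      | none => altLoop rest (PySem.Set.add seen s) (some s)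

def is_valid_steps_alt (steps : String) : Bool :=
  if steps.toList.isEmpty then false
  else altLoop steps.toList PySem.Set.empty none

-- ===== PRECONDITION & SPEC =====
def Spec_is_valid_steps (steps : String) (out : Bool) : Prop := out = is_valid_steps_alt steps
instance (steps : String) (out : Bool) : Decidable (Spec_is_valid_steps steps out) := by unfold Spec_is_valid_steps; infer_instance

-- ===== CLAIM (what is proved, stated in full; the proofs are below) =====
def Claim_equal_is_valid_steps : Prop := ∀ (steps : String), Dom_is_valid_steps steps → Spec_is_valid_steps steps (is_valid_steps steps)

-- ===== LEMMAS AND PROOFS =====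

-- A's dedup step, named for the proofs
def pvStep (acc : List Char) (s : Char) : List Char :=
  if acc.contains s then acc else acc ++ [s]

theorem foldl_pvStep_prefix (l : List Char) : ∀ ord : List Char, ord <+: l.foldl pvStep ord := by
  induction l with
  | nil => intro ord; exact List.prefix_rfl
  | cons s rest ih =>
    intro ord
    simp only [List.foldl_cons]
    refine List.IsPrefix.trans ?_ (ih (pvStep ord s))
    unfold pvStep
    split
    · exact List.prefix_rfl
    · exact ⟨[s], rfl⟩

theorem foldl_pvStep_nodup (l : List Char) :
    ∀ ord : List Char, ord.Nodup → (l.foldl pvStep ord).Nodup := by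
  induction l with
  | nil => intro ord h; exact h
  | cons s rest ih =>
    intro ord h
    simp only [List.foldl_cons]
    apply ih
    unfold pvStep
    split
    · exact h
    · next hc =>
      simp only [List.contains_eq_mem, decide_eq_true_eq] at hc
      rw [List.nodup_append]
      refine ⟨h, List.nodup_singleton s, ?_⟩
      intro a ha b hb
      simp only [List.mem_singleton] at hb
      subst hb
      exact fun h2 => hc (h2 ▸ ha)

theorem pairwise_last_le (ord : List Char) (c : Char) (hl : ord.getLast? = some c)
    (hp : ord.Pairwise (· < ·)) : ∀ a ∈ ord, a ≤ c := by
  induction ord with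
  | nil => simp at hl
  | cons x t ih =>
    cases t with
    | nil =>
      simp only [List.getLast?_singleton, Option.some.injEq] at hl
      intro a ha; simp only [List.mem_singleton] at ha; simp [ha, hl]
    | cons y u =>
      rw [List.getLast?_cons_cons] at hl
      rcases List.pairwise_cons.mp hp with ⟨hx, hp'⟩
      intro a ha
      rcases List.mem_cons.mp ha with rfl | ha'
      · exact le_of_lt (lt_of_lt_of_le (hx y (by simp)) (ih hl hp' y (by simp)))
      · exact ih hl hp' a ha'

-- B's loop computes: every char valid AND the dedup list (continued from ord) stays strictly increasing
theorem altLoop_eq (l : List Char) : ∀ ord : List Char, ord.Pairwise (· < ·) →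
    altLoop l ord ord.getLast? =
      (l.all (fun s => ("1234" : String).toList.contains s) &&
       decide ((l.foldl pvStep ord).Pairwise (· < ·))) := by
  induction l with
  | nil =>
    intro ord hp
    simp [altLoop, hp]
  | cons s rest ih =>
    intro ord hp
    simp only [altLoop, List.all_cons, List.foldl_cons]
    cases hv : (("1234" : String).toList.contains s) with
    | false =>
      simp only [Bool.not_false, Bool.false_and]
      simp
    | true =>
      simp only [Bool.not_true, Bool.false_eq_true, if_false, Bool.true_and]
      by_cases hmem : s ∈ ord
      · have h1 : PySem.Set.contains ord s = true := by
          simp [PySem.Set.contains, List.contains_eq_mem, hmem]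
        have h2 : pvStep ord s = ord := by
          simp [pvStep, List.contains_eq_mem, hmem]
        simp only [h1, h2, if_true]
        exact ih ord hp
      · have h1 : PySem.Set.contains ord s = false := by
          simp [PySem.Set.contains, List.contains_eq_mem, hmem]
        have hadd : PySem.Set.add ord s = ord ++ [s] := by
          simp [PySem.Set.add, PySem.Set.contains, List.contains_eq_mem, hmem]
        have h2 : pvStep ord s = ord ++ [s] := by
          simp [pvStep, List.contains_eq_mem, hmem]
        simp only [h1, Bool.false_eq_true, if_false, h2, hadd]
        cases hlast : ord.getLast? with
        | none =>
          have hordnil : ord = [] := List.getLast?_eq_none_iff.mp hlast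
          subst hordnil
          have h3 := ih ([] ++ [s]) (by simp)
          simpa using h3
        | some c =>
          have hcmem : c ∈ ord := List.mem_of_getLast? hlast
          by_cases hlt : s < c
          · simp only [if_pos hlt]
            have hnp : ¬ (ord ++ [s]).Pairwise (· < ·) := by
              intro h
              rcases List.pairwise_append.mp h with ⟨_, _, hall⟩
              exact absurd (hall c hcmem s (by simp)) (not_lt_of_gt hlt)
            have hnp2 : ¬ ((rest.foldl pvStep (ord ++ [s])).Pairwise (· < ·)) :=
              fun h => hnp (h.sublist (foldl_pvStep_prefix rest (ord ++ [s])).sublist)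
            simp [hnp2]
          · simp only [if_neg hlt]
            have hne : c ≠ s := fun h => hmem (h ▸ hcmem)
            have hcs : c < s := lt_of_le_of_ne (not_lt.mp hlt) hne
            have hp2 : (ord ++ [s]).Pairwise (· < ·) := by
              rw [List.pairwise_append]
              refine ⟨hp, List.pairwise_singleton _ _, fun a ha b hb => ?_⟩
              simp only [List.mem_singleton] at hb; subst hb
              exact lt_of_le_of_lt (pairwise_last_le ord c hlast hp a ha) hcs
            have h3 := ih (ord ++ [s]) hp2
            rw [List.getLast?_append] at h3
            simpa using h3

-- a duplicate-free list equals its sorted version iff it is strictly increasing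
theorem eq_sorted_iff_pairwise (ord : List Char) (hnd : ord.Nodup) :
    (ord = PySem.List.sorted ord (fun x => x) false) ↔ ord.Pairwise (· < ·) := by
  constructor
  · intro h
    have hle : ord.Pairwise (fun a b : Char => a ≤ b) := by
      rw [h]
      exact PySem.List.sorted_pairwise ord (fun x => x)
    have hne : ord.Pairwise (fun a b : Char => a ≠ b) := hnd
    exact (hle.and hne).imp (fun hab => lt_of_le_of_ne hab.1 hab.2)
  · intro h
    exact (PySem.List.sorted_eq_self_of_pairwise ord (fun x => x) (h.imp le_of_lt)).symm

-- ===== VERDICT (by name: the statement is the Claim_ definition above) =====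
theorem is_valid_steps_spec : Claim_equal_is_valid_steps := by
  intro steps _
  unfold Spec_is_valid_steps is_valid_steps is_valid_steps_alt
  by_cases he : steps.toList.isEmpty
  · simp [he]
  · have he' : steps.toList.isEmpty = false := by
      cases h : steps.toList.isEmpty
      · rfl
      · exact absurd h he
    have hB := altLoop_eq steps.toList [] List.Pairwise.nil
    simp only [List.getLast?_nil] at hB
    simp only [he', Bool.false_eq_true, if_false,
      show (PySem.Set.empty : PySem.Set Char) = ([] : List Char) from rfl, hB]
    cases ha : (steps.toList.any (fun s => !(("1234" : String).toList.contains s))) with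
    | true =>
      have hall : steps.toList.all (fun s => ("1234" : String).toList.contains s) = false := by
        rw [List.all_eq_not_any_not, ha, Bool.not_true]
      rw [if_pos rfl, hall, Bool.false_and]
    | false =>
      have hall : steps.toList.all (fun s => ("1234" : String).toList.contains s) = true := by
        rw [List.all_eq_not_any_not, ha, Bool.not_false]
      have hnd : (steps.toList.foldl pvStep []).Nodup :=
        foldl_pvStep_nodup steps.toList [] List.nodup_nil
      simp only [Bool.false_eq_true, if_false, hall, Bool.true_and,
        show (fun acc (s : Char) => if acc.contains s then acc else acc ++ [s]) = pvStep from rfl]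
      exact decide_eq_decide.mpr (eq_sorted_iff_pairwise _ hnd)
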